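-- pv_equiv track=rewrite | github.com/SwagLyrics/SwagLyrics-discord-bot | SwaglyricsBot/general_commands.py | pack_into_messages
-- ===== SOURCE A (Python) =====
-- def pack_into_messages(chunks):
--     """
--     Splits chunks into separate messages, discord limits one message to 6000 chars.
--     """
--     messages = [[]]
--     i = 0
--     for chunk in chunks:
--         if sum(len(j) for j in messages[i]) + len(chunk) > 6000: # if sum of chars in message + chunk length exceeds limit
--             i = i + 1
--             messages.append([])
--         messages[i].append(chunk)
--     return messages
-- ===== SOURCE B (Python) =====
-- def _take(chunks):
--     """Longest prefix of chunks whose total length stays within 6000, plus the remainder."""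
--     total = 0
--     k = 0
--     while k < len(chunks) and total + len(chunks[k]) <= 6000:
--         total += len(chunks[k])
--         k += 1
--     return chunks[:k], chunks[k:]
--
--
-- def pack_into_messages(chunks):
--     """
--     Splits chunks into separate messages, discord limits one message to 6000 chars.
--     Repeatedly splits off the maximal prefix fitting the limit (an oversized chunk
--     goes alone), instead of iterating chunk by chunk over a mutable message list.
--     """
--     first, rest = _take(chunks)
--     messages = [first]
--     while rest:
--         head, tail = _take(rest)
--         if not head:                 # single chunk longer than the limit: it goes alone
--             head, tail = rest[:1], rest[1:]
--         messages.append(head)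
--         rest = tail
--     return messages
-- ===== Notes on version B (the rewrite author's own statement) =====
-- stated objective: faster
-- what changed: B repeatedly splits off the maximal prefix of the remaining chunks that fits in 6000 characters (slicing off one whole message at a time, an oversized chunk going alone) instead of A's chunk-by-chunk loop that re-sums the current message with a generator and mutates an indexed list of lists.
import Mathlib
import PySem

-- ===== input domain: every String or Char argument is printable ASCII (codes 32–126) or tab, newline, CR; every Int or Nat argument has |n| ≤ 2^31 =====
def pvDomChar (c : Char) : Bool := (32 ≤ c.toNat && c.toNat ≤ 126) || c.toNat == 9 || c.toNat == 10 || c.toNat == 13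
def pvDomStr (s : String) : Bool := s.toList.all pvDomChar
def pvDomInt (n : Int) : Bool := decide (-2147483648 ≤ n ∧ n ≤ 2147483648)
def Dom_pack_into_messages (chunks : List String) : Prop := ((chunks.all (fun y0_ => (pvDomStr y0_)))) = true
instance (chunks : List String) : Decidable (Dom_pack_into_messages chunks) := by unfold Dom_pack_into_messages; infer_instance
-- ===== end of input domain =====

-- B repeatedly splits off the maximal prefix of the remaining chunks that fits in 6000 chars
-- (an oversized chunk goes alone) instead of A's chunk-by-chunk loop that re-sums the current
-- message and mutates an indexed list of lists (objective: faster, no per-chunk re-summation).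

-- ===== PORT A =====
-- one loop iteration: state is (messages, i), exactly A's two variables
def pack_into_messages_step (st : List (List String) × Int) (chunk : String) :
    List (List String) × Int :=
  let (messages, i) :=
    if ((PySem.List.pyGetD st.1 st.2 []).map PySem.Str.len).sum + PySem.Str.len chunk > 6000 then
      (st.1 ++ [[]], st.2 + 1)
    else (st.1, st.2)
  (PySem.List.pySetD messages i (PySem.List.pyGetD messages i [] ++ [chunk]), i)

def pack_into_messages (chunks : List String) : List (List String) :=
  (chunks.foldl pack_into_messages_step ([[]], 0)).1

-- ===== PORT B =====
-- Source B's _take: the while loop computing k, then (chunks[:k], chunks[k:])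
def pack_take_count : List String → Int → Nat
  | [], _ => 0
  | c :: cs, total =>
    if total + PySem.Str.len c ≤ 6000 then 1 + pack_take_count cs (total + PySem.Str.len c)
    else 0

def pack_take (chunks : List String) : List String × List String :=
  let k := pack_take_count chunks 0
  (chunks.take k, chunks.drop k)

-- Source B's while loop over the remainder
def pack_messages_go (rest : List String) : List (List String) :=
  match rest with
  | [] => []
  | c :: cs =>
    let k := pack_take_count (c :: cs) 0
    if k = 0 then (c :: cs).take 1 :: pack_messages_go ((c :: cs).drop 1)
    else (c :: cs).take k :: pack_messages_go ((c :: cs).drop k)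
termination_by rest.length
decreasing_by
  · simp
  · simp only [List.length_drop, List.length_cons]
    omega

def pack_into_messages_alt (chunks : List String) : List (List String) :=
  let (first, rest) := pack_take chunks
  first :: pack_messages_go rest

-- ===== PRECONDITION & SPEC =====
def Spec_pack_into_messages (chunks : List String) (out : List (List String)) : Prop := out = pack_into_messages_alt chunks
instance (chunks : List String) (out : List (List String)) : Decidable (Spec_pack_into_messages chunks out) := by unfold Spec_pack_into_messages; infer_instance

-- ===== CLAIM (what is proved, stated in full; the proofs are below) =====
def Claim_equal_pack_into_messages : Prop := ∀ (chunks : List String), Dom_pack_into_messages chunks → Spec_pack_into_messages chunks (pack_into_messages chunks)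

-- ===== LEMMAS AND PROOFS =====

-- proof-only helper: A's loop rephrased with an explicit (done, current, total) accumulator
def pv_go (chunks : List String) (acc : List (List String)) (cur : List String) (total : Int) :
    List (List String) :=
  match chunks with
  | [] => acc ++ [cur]
  | chunk :: rest =>
    if total + PySem.Str.len chunk > 6000 then
      pv_go rest (acc ++ [cur]) [chunk] (PySem.Str.len chunk)
    else
      pv_go rest acc (cur ++ [chunk]) (total + PySem.Str.len chunk)

lemma pv_getD_last (acc : List (List String)) (cur : List String) :
    PySem.List.pyGetD (acc ++ [cur]) ((acc.length : Int)) ([] : List String) = cur := by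
  simp [PySem.List.pyGetD_natCast, List.getD]

lemma pv_setD_last (acc : List (List String)) (cur v : List String) :
    PySem.List.pySetD (acc ++ [cur]) ((acc.length : Int)) v = acc ++ [v] := by
  simp [PySem.List.pySetD_natCast]

-- loop invariant: A's state is (acc ++ [cur], acc.length) and pv_go carries (acc, cur, Σ len cur)
lemma pv_loop_eq (chunks : List String) : ∀ (acc : List (List String)) (cur : List String),
    (chunks.foldl pack_into_messages_step (acc ++ [cur], (acc.length : Int))).1
      = pv_go chunks acc cur ((cur.map PySem.Str.len).sum) := by
  induction chunks with
  | nil => intro acc cur; simp [pv_go]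
  | cons chunk rest ih =>
    intro acc cur
    simp only [List.foldl_cons, pv_go, pack_into_messages_step, pv_getD_last]
    by_cases h : (cur.map PySem.Str.len).sum + PySem.Str.len chunk > 6000
    · simp only [if_pos h]
      have h1 : PySem.List.pyGetD ((acc ++ [cur]) ++ [[]]) ((acc.length : Int) + 1)
          ([] : List String) = ([] : List String) := by
        have := pv_getD_last (acc ++ [cur]) ([] : List String)
        simpa [List.append_assoc] using this
      have h2 : PySem.List.pySetD ((acc ++ [cur]) ++ [[]]) ((acc.length : Int) + 1)
          ([] ++ [chunk]) = (acc ++ [cur]) ++ [[chunk]] := by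
        have := pv_setD_last (acc ++ [cur]) ([] : List String) ([] ++ [chunk])
        simpa [List.append_assoc] using this
      rw [h1, h2]
      have := ih (acc ++ [cur]) [chunk]
      simpa [List.append_assoc] using this
    · simp only [if_neg h]
      rw [pv_setD_last]
      have := ih acc (cur ++ [chunk])
      simpa [List.append_assoc, add_comm] using this

lemma pv_len_nonneg (s : String) : 0 ≤ PySem.Str.len s := by
  simp [PySem.Str.len_eq]

lemma pv_take_count_over (chunks : List String) (t : Int) (ht : t > 6000) :
    pack_take_count chunks t = 0 := by
  cases chunks with
  | nil => rfl
  | cons c cs =>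
    have := pv_len_nonneg c
    simp [pack_take_count]
    omega

-- bridge: the accumulator loop produces exactly the prefix-splitting messages
lemma pv_go_eq_split (chunks : List String) :
    ∀ (acc : List (List String)) (cur : List String) (t : Int), t = (cur.map PySem.Str.len).sum →
    pv_go chunks acc cur t
      = acc ++ (cur ++ chunks.take (pack_take_count chunks t))
          :: pack_messages_go (chunks.drop (pack_take_count chunks t)) := by
  induction chunks with
  | nil => intro acc cur t _; simp [pv_go, pack_take_count, pack_messages_go]
  | cons c cs ih =>
    intro acc cur t ht
    by_cases h : t + PySem.Str.len c > 6000
    · have h' : t + (c.length : Int) > 6000 := by simpa using h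
      have hk : pack_take_count (c :: cs) t = 0 := by
        simp [pack_take_count]; omega
      rw [hk]
      simp only [pv_go, if_pos h, List.take_zero, List.drop_zero, List.append_nil]
      rw [ih (acc ++ [cur]) [c] (PySem.Str.len c) (by simp)]
      have hgo : pack_messages_go (c :: cs)
          = ([c] ++ cs.take (pack_take_count cs (PySem.Str.len c)))
            :: pack_messages_go (cs.drop (pack_take_count cs (PySem.Str.len c))) := by
        by_cases hc : (c.length : Int) ≤ 6000
        · have hk2 : pack_take_count (c :: cs) 0 = 1 + pack_take_count cs (PySem.Str.len c) := by
            simp [pack_take_count]; omega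
          rw [pack_messages_go]
          simp only [hk2]
          rw [if_neg (by omega)]
          simp [List.take_succ_cons, List.drop_succ_cons, Nat.add_comm 1]
        · have hk2 : pack_take_count (c :: cs) 0 = 0 := by
            simp [pack_take_count]; omega
          have hk3 : pack_take_count cs (PySem.Str.len c) = 0 :=
            pv_take_count_over cs _ (by simp; omega)
          have hk3' : pack_take_count cs ((c.length : Int)) = 0 := by
            simpa using hk3
          rw [pack_messages_go]
          simp [hk2, hk3']
      rw [hgo]
      simp [List.append_assoc]
    · have h' : ¬ t + (c.length : Int) > 6000 := by simpa using h
      have hk : pack_take_count (c :: cs) t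
          = 1 + pack_take_count cs (t + PySem.Str.len c) := by
        simp [pack_take_count]; omega
      rw [hk]
      simp only [pv_go, if_neg h]
      rw [ih acc (cur ++ [c]) (t + PySem.Str.len c) (by simp [ht, add_comm])]
      simp [List.take_succ_cons, List.drop_succ_cons, Nat.add_comm 1, List.append_assoc]

-- ===== VERDICT (by name: the statement is the Claim_ definition above) =====
theorem pack_into_messages_spec : Claim_equal_pack_into_messages := by
  intro chunks _
  unfold Spec_pack_into_messages pack_into_messages pack_into_messages_alt
  have h1 := pv_loop_eq chunks [] []
  have h2 := pv_go_eq_split chunks [] [] 0 (by simp)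
  simp only [List.nil_append, List.length_nil, Nat.cast_zero, List.map_nil, List.sum_nil] at h1 h2
  rw [h1, h2]
  simp [pack_take]
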